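-- pv_equiv track=rewrite | github.com/Chanterz/CodeWars | dirReduc.py | dir_reduce
-- ===== SOURCE A (Python) =====
-- def dir_reduce(directions_list):
--     directions_values = {"NORTH": -1, "SOUTH": 1, "WEST": -5, "EAST": 5}
--     reduced_directions_list = [directions_list[0]] if len(directions_list) else None
--     if reduced_directions_list is None:
--         return []
--     for direction in directions_list[1:]:
--         if (not len(reduced_directions_list)
--                 or directions_values[reduced_directions_list[-1]] + directions_values[direction]):
--             reduced_directions_list.append(direction)
--         else:
--             del reduced_directions_list[-1]
--     return reduced_directions_list
-- ===== SOURCE B (Python) =====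
-- def dir_reduce(directions_list):
--     directions_values = {"NORTH": -1, "SOUTH": 1, "WEST": -5, "EAST": 5}
--     result = list(directions_list)
--     changed = True
--     while changed:
--         changed = False
--         i = 0
--         while i + 1 < len(result):
--             if directions_values[result[i]] + directions_values[result[i + 1]] == 0:
--                 del result[i:i + 2]
--                 changed = True
--             else:
--                 i += 1
--     return result
-- ===== Notes on version B (the rewrite author's own statement) =====
-- stated objective: alternative
-- what changed: Replaces A's single left-to-right stack pass with a scan that deletes adjacent cancelling pairs in place, repeated until a full pass deletes nothing.
-- outside the precondition, e.g. on dir_reduce(['NORTH', 'SOUTH', 'FOO']): A returns ['FOO'], B returns ['FOO']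
import Mathlib
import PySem

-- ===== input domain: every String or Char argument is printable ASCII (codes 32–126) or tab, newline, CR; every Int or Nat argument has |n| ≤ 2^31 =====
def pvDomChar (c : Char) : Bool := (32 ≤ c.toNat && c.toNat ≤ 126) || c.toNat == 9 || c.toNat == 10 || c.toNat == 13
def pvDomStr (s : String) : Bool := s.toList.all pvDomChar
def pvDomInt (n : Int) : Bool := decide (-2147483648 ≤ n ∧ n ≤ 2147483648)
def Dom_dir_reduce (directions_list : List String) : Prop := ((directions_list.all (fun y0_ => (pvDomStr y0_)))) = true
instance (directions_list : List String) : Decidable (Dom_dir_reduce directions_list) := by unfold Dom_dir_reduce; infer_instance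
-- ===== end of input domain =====

-- B replaces A's single stack pass by repeated scan-and-delete of adjacent opposite
-- pairs until a fixpoint (alternative decomposition, not faster); return values only
-- (neither program mutates its argument observably).

-- Both Pythons look directions up in {"NORTH": -1, "SOUTH": 1, "WEST": -5, "EAST": 5};
-- that lookup raises KeyError on any other string (those inputs are outside Pre_ below)
-- and the ports return 0 there.
def pvVal (s : String) : Int :=
  PySem.Dict.getD (PySem.Dict.ofList [("NORTH", (-1 : Int)), ("SOUTH", 1), ("WEST", -5), ("EAST", 5)]) s 0

-- ===== PORT A =====
def dir_reduce (directions_list : List String) : List String :=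
  match directions_list with
  | [] => []
  | d0 :: rest =>
    rest.foldl (fun reduced direction =>
      if reduced.length = 0 ∨ pvVal (PySem.List.pyGetD reduced (-1) "") + pvVal direction ≠ 0 then
        reduced ++ [direction]
      else reduced.dropLast) [d0]

-- ===== PORT B =====
-- one pass of B's inner while loop: delete adjacent cancelling pairs left to right,
-- returning the shrunk list and the `changed` flag
def pvSweep : List String → List String × Bool
  | [] => ([], false)
  | [x] => ([x], false)
  | a :: b :: t =>
    if pvVal a + pvVal b = 0 then ((pvSweep t).1, true)
    else
      let r := pvSweep (b :: t)
      (a :: r.1, r.2)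

-- needed for pvLoop's termination (each changed pass deletes at least one pair)
theorem pvSweep_length_lt : ∀ l : List String, (pvSweep l).2 = true → (pvSweep l).1.length < l.length
  | [], h => by simp [pvSweep] at h
  | [x], h => by simp [pvSweep] at h
  | a :: b :: t, h => by
    by_cases hc : pvVal a + pvVal b = 0
    · have := pvSweep_length_le t
      simp [pvSweep, hc]; omega
    · simp [pvSweep, hc] at h ⊢
      have := pvSweep_length_lt (b :: t) h
      simpa using this
where
  pvSweep_length_le : ∀ l : List String, (pvSweep l).1.length ≤ l.length
  | [] => by simp [pvSweep]
  | [x] => by simp [pvSweep]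
  | a :: b :: t => by
    by_cases hc : pvVal a + pvVal b = 0
    · have := pvSweep_length_le t
      simp [pvSweep, hc]; omega
    · have := pvSweep_length_le (b :: t)
      simp [pvSweep, hc] at this ⊢; omega

-- B's outer while loop: repeat the sweep until a pass deletes nothing
def pvLoop (l : List String) : List String :=
  if h : (pvSweep l).2 = true then pvLoop (pvSweep l).1 else l
termination_by l.length
decreasing_by exact pvSweep_length_lt l h

def dir_reduce_alt (directions_list : List String) : List String :=
  pvLoop directions_list

-- ===== PRECONDITION & SPEC =====
-- Pre_ excludes lists of two or more elements containing a non-direction string: on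
-- those the dict lookup raises KeyError in both Pythons whenever the invalid string
-- meets a comparison — except that A (and, on fewer inputs, B) happens to return the
-- invalid string unvalidated when cancellation leaves it isolated, an adjacency
-- artefact of the traversal (on the cited such input A and B agree anyway).
def Pre_dir_reduce (directions_list : List String) : Prop :=
  directions_list.length ≤ 1 ∨
    ∀ s ∈ directions_list, s = "NORTH" ∨ s = "SOUTH" ∨ s = "EAST" ∨ s = "WEST"
instance (directions_list : List String) : Decidable (Pre_dir_reduce directions_list) := by
  unfold Pre_dir_reduce; infer_instance

def pvWitness_dir_reduce : List String := ["NORTH", "SOUTH", "EAST", "WEST", "WEST"]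

def Spec_dir_reduce (directions_list : List String) (out : List String) : Prop :=
  out = dir_reduce_alt directions_list
instance (directions_list : List String) (out : List String) : Decidable (Spec_dir_reduce directions_list out) := by
  unfold Spec_dir_reduce; infer_instance

-- ===== CLAIM (what is proved, stated in full; the proofs are below) =====
def Claim_equal_dir_reduce : Prop := ∀ (directions_list : List String), Dom_dir_reduce directions_list → Pre_dir_reduce directions_list → Spec_dir_reduce directions_list (dir_reduce directions_list)

-- ===== LEMMAS AND PROOFS =====

def pvValid (s : String) : Prop :=
  s = "NORTH" ∨ s = "SOUTH" ∨ s = "EAST" ∨ s = "WEST"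

-- A's step on the stack, and the same step on the reversed (head-first) stack
def pvStep (reduced : List String) (direction : String) : List String :=
  if reduced.length = 0 ∨ pvVal (PySem.List.pyGetD reduced (-1) "") + pvVal direction ≠ 0 then
    reduced ++ [direction]
  else reduced.dropLast

def pvRStep (s : List String) (d : String) : List String :=
  match s with
  | [] => [d]
  | x :: xs => if pvVal x + pvVal d ≠ 0 then d :: x :: xs else xs

theorem pvStep_reverse (s : List String) (d : String) :
    pvStep s d = (pvRStep s.reverse d).reverse := by
  rcases s.eq_nil_or_concat with rfl | ⟨ys, x, rfl⟩
  · simp [pvStep, pvRStep]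
  · simp only [pvStep, pvRStep]
    by_cases h : pvVal x + pvVal d ≠ 0 <;> simp [h]

theorem pvFoldl_reverse (l : List String) : ∀ s : List String,
    l.foldl pvStep s = (l.foldl pvRStep s.reverse).reverse := by
  induction l with
  | nil => intro s; simp
  | cons a t ih =>
    intro s
    rw [List.foldl_cons, List.foldl_cons, ih, pvStep_reverse, List.reverse_reverse]

-- characterisation of A as a head-first stack fold
theorem dir_reduce_char (l : List String) :
    dir_reduce l = (l.foldl pvRStep []).reverse := by
  cases l with
  | nil => rfl
  | cons d0 rest =>
    have h1 : dir_reduce (d0 :: rest) = rest.foldl pvStep [d0] := rfl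
    rw [h1, pvFoldl_reverse, List.foldl_cons]
    rfl

theorem pvVal_inj {a b : String} (ha : pvValid a) (hb : pvValid b) (h : pvVal a = pvVal b) :
    a = b := by
  rcases ha with rfl | rfl | rfl | rfl <;> rcases hb with rfl | rfl | rfl | rfl <;>
    first | rfl | (exfalso; revert h; decide)

-- the stack invariant: entries stay valid and adjacent entries never cancel
theorem pvRStep_good {s : List String} {d : String} (hs : ∀ x ∈ s, pvValid x)
    (hd : pvValid d) : ∀ x ∈ pvRStep s d, pvValid x := by
  cases s with
  | nil => simpa [pvRStep]
  | cons x xs =>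
    by_cases h : pvVal x + pvVal d ≠ 0 <;> simp_all [pvRStep]

theorem pvRStep_chain {s : List String} {d : String}
    (hc : List.IsChain (fun x y => pvVal x + pvVal y ≠ 0) s) :
    List.IsChain (fun x y => pvVal x + pvVal y ≠ 0) (pvRStep s d) := by
  cases s with
  | nil => exact List.isChain_singleton d
  | cons x xs =>
    by_cases h : pvVal x + pvVal d ≠ 0
    · simp only [pvRStep, if_pos h]
      exact List.isChain_cons_cons.mpr ⟨by omega, hc⟩
    · simpa [pvRStep, h] using hc.tail

-- deleting an adjacent cancelling pair does not change the stack result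
theorem pvRfold_cancel (s t : List String) (a b : String)
    (hs : ∀ x ∈ s, pvValid x)
    (hc : List.IsChain (fun x y => pvVal x + pvVal y ≠ 0) s)
    (hb : pvValid b) (hab : pvVal a + pvVal b = 0) :
    List.foldl pvRStep s (a :: b :: t) = List.foldl pvRStep s t := by
  have key : pvRStep (pvRStep s a) b = s := by
    cases s with
    | nil => simp [pvRStep, hab]
    | cons x xs =>
      by_cases h : pvVal x + pvVal a ≠ 0
      · simp [pvRStep, h, hab]
      · have hx : pvValid x := hs x (by simp)
        have hbx : b = x := pvVal_inj hb hx (by omega)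
        cases xs with
        | nil => simp [pvRStep, h, hbx]
        | cons y ys =>
          have hxy : pvVal x + pvVal y ≠ 0 := (List.isChain_cons_cons.mp hc).1
          simp only [pvRStep, if_neg h]
          rw [if_pos (by rw [hbx]; omega), hbx]
  simp only [List.foldl_cons, key]

-- a sweep's output is drawn from its input
theorem pvSweep_subset : ∀ l : List String, ∀ x ∈ (pvSweep l).1, x ∈ l
  | [] => by simp [pvSweep]
  | [y] => by simp [pvSweep]
  | a :: b :: t => by
    intro x hx
    by_cases hc : pvVal a + pvVal b = 0
    · simp only [pvSweep, if_pos hc] at hx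
      have := pvSweep_subset t x hx
      simp [this]
    · simp only [pvSweep, if_neg hc] at hx
      rcases List.mem_cons.mp hx with rfl | hx
      · simp
      · have := pvSweep_subset (b :: t) x hx
        simpa using Or.inr (by simpa using this)

-- one sweep preserves the stack result
theorem pvSweep_fold : ∀ l s : List String, (∀ x ∈ l, pvValid x) → (∀ x ∈ s, pvValid x) →
    List.IsChain (fun x y => pvVal x + pvVal y ≠ 0) s →
    List.foldl pvRStep s (pvSweep l).1 = List.foldl pvRStep s l
  | [], s, _, _, _ => by simp [pvSweep]
  | [x], s, _, _, _ => by simp [pvSweep]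
  | a :: b :: t, s, hl, hs, hc => by
    have hb : pvValid b := hl b (by simp)
    by_cases hcan : pvVal a + pvVal b = 0
    · simp only [pvSweep, if_pos hcan]
      rw [pvSweep_fold t s (fun x hx => hl x (by simp [hx])) hs hc]
      exact (pvRfold_cancel s t a b hs hc hb hcan).symm
    · simp only [pvSweep, if_neg hcan, List.foldl_cons]
      exact pvSweep_fold (b :: t) (pvRStep s a) (fun x hx => hl x (by simp at hx; simp [hx]))
        (pvRStep_good hs (hl a (by simp))) (pvRStep_chain hc)

-- an unchanged sweep means no adjacent pair cancels
theorem pvSweep_false_chain : ∀ l : List String, (pvSweep l).2 = false →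
    List.IsChain (fun x y => pvVal x + pvVal y ≠ 0) l
  | [] => fun _ => List.isChain_nil
  | [x] => fun _ => List.isChain_singleton x
  | a :: b :: t => by
    intro h
    by_cases hc : pvVal a + pvVal b = 0
    · simp [pvSweep, hc] at h
    · simp only [pvSweep, if_neg hc] at h
      exact List.isChain_cons_cons.mpr ⟨hc, pvSweep_false_chain (b :: t) h⟩

-- the stack pass leaves an already-irreducible list (reversed) unchanged
theorem pvRfold_irred : ∀ (l s : List String),
    List.IsChain (fun x y => pvVal x + pvVal y ≠ 0) l →
    (∀ x ∈ s.head?, ∀ a ∈ l.head?, pvVal x + pvVal a ≠ 0) →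
    List.foldl pvRStep s l = l.reverse ++ s
  | [], s, _, _ => by simp
  | a :: t, s, hc, hhead => by
    have hstep : pvRStep s a = a :: s := by
      cases s with
      | nil => rfl
      | cons x xs =>
        have := hhead x (by simp) a (by simp)
        simp [pvRStep, this]
    rw [List.foldl_cons, hstep,
      pvRfold_irred t (a :: s) hc.tail
        (by
          intro x hx y hy
          simp at hx; subst hx
          exact (List.isChain_cons.mp hc).1 y hy)]
    simp

theorem pvLoop_eq : ∀ n : Nat, ∀ l : List String, l.length ≤ n → (∀ x ∈ l, pvValid x) →
    pvLoop l = (l.foldl pvRStep []).reverse := by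
  intro n
  induction n with
  | zero =>
    intro l hn _
    have : l = [] := List.eq_nil_of_length_eq_zero (Nat.le_zero.mp hn)
    subst this
    rw [pvLoop]; rfl
  | succ n ih =>
    intro l hn hl
    rw [pvLoop]
    by_cases h : (pvSweep l).2 = true
    · rw [dif_pos h]
      have hlt := pvSweep_length_lt l h
      rw [ih (pvSweep l).1 (by omega) (fun x hx => hl x (pvSweep_subset l x hx))]
      rw [pvSweep_fold l [] hl (by simp) (by simp)]
    · rw [dif_neg h]
      simp only [Bool.not_eq_true] at h
      have := pvRfold_irred l [] (pvSweep_false_chain l h) (by simp)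
      rw [this]
      simp

-- ===== VERDICT (by name: the statement is the Claim_ definition above) =====
theorem dir_reduce_spec : Claim_equal_dir_reduce := by
  intro l _ hpre
  unfold Spec_dir_reduce dir_reduce_alt
  rcases hpre with hlen | hval
  · match l, hlen with
    | [], _ => rw [pvLoop]; rfl
    | [x], _ => rw [pvLoop]; simp [pvSweep, dir_reduce]
  · rw [dir_reduce_char, pvLoop_eq l.length l le_rfl (fun s hs => hval s hs)]
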